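-- pv_equiv track=rewrite | github.com/AISyLab/AISY_Framework | aisy/sca_functions.py | get_best_models
-- ===== SOURCE A (Python) =====
-- def get_best_models(n_models, result_models_validation, n_traces):
--
--     """
--     Compute list of best models based on the GE.
--     """
--
--     result_number_of_traces_val = []
--     for model_index in range(n_models):
--         if result_models_validation[model_index][n_traces - 1] == 1:
--             for index in range(n_traces - 1, -1, -1):
--                 if result_models_validation[model_index][index] != 1:
--                     result_number_of_traces_val.append(
--                         [result_models_validation[model_index][n_traces - 1], index + 1,
--                          model_index])
--                     break
--         else:
--             result_number_of_traces_val.append(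
--                 [result_models_validation[model_index][n_traces - 1], n_traces,
--                  model_index])
--
--     sorted_models = sorted(result_number_of_traces_val, key=lambda l: l[:])
--
--     list_of_best_models = []
--     for model_index in range(n_models):
--         list_of_best_models.append(sorted_models[model_index][2])
--
--     return list_of_best_models
-- ===== SOURCE B (Python) =====
-- def get_best_models(n_models, result_models_validation, n_traces):
--     """
--     Compute list of best models based on the GE.
--     Simpler decomposition: sort the model indices directly with a key function
--     (final GE value, convergence point, model index); the convergence point of
--     a converged model is found by popping the trailing converged entries off a
--     copy of the GE curve instead of scanning backward for the first non-1.
--     """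
--     def convergence_key(model_index):
--         row = result_models_validation[model_index]
--         final = row[n_traces - 1]
--         if final != 1:
--             return [final, n_traces, model_index]
--         trimmed = row[:n_traces]
--         while trimmed and trimmed[-1] == 1:
--             trimmed.pop()
--         return [final, len(trimmed), model_index]
--     return sorted(range(n_models), key=convergence_key)
-- ===== Notes on version B (the rewrite author's own statement) =====
-- stated objective: simpler
-- what changed: A's three stages (build a list of [final, count, index] triples with a backward early-break scan, sort it by a slice key, then extract column 2 in a third indexed loop) are replaced by a single sorted(range(n_models), key=...) over the model indices, whose key computes the convergence point by popping trailing converged entries off a copy of the curve.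
import Mathlib
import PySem

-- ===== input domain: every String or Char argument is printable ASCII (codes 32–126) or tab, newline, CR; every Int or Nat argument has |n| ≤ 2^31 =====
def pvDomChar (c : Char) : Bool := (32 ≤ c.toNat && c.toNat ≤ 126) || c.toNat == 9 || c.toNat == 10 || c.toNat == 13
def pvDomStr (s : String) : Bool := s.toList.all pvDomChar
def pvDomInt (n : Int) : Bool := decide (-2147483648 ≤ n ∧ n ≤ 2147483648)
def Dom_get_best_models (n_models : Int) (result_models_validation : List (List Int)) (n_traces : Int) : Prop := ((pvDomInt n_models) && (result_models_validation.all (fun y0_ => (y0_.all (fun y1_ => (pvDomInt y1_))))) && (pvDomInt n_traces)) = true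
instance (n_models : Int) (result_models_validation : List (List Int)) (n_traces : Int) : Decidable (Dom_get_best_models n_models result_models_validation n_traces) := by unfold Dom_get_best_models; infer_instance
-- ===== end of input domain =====

-- B replaces A's three stages (build a triple list with a backward early-break scan, sort
-- it, extract column 2 in a third loop) by one sorted-with-key over the model indices,
-- whose key finds the convergence point by popping trailing converged entries
-- (objective: simpler).

-- ===== PORT A =====
-- body of A's first for-loop (outer accumulator loop over model_index)
def pvStepA (result_models_validation : List (List Int)) (n_traces : Int)
    (acc : List (List Int)) (model_index : Int) : List (List Int) :=
  match PySem.List.pyGet? result_models_validation model_index with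
  | none => acc                                   -- IndexError; excluded by Pre_
  | some row =>
    match PySem.List.pyGet? row (n_traces - 1) with
    | none => acc                                 -- IndexError; excluded by Pre_
    | some v =>
      if v = 1 then
        -- 'for index in range(n_traces-1, -1, -1): if row[index] != 1: append; break'
        -- = first index of the countdown range whose entry is ≠ 1 (all these indexes are
        -- in range whenever row[n_traces-1] succeeded, so pyGetD's default is never read)
        match (PySem.List.pyRange (n_traces - 1) (-1) (-1)).find?
            (fun index => PySem.List.pyGetD row index 1 != 1) with
        | some index => acc ++ [[v, index + 1, model_index]]
        | none => acc
      else acc ++ [[v, n_traces, model_index]]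

-- body of A's last for-loop (list_of_best_models.append(sorted_models[model_index][2]))
def pvFinStepA (sorted_models : List (List Int)) (acc : List Int) (model_index : Int) : List Int :=
  match PySem.List.pyGet? sorted_models model_index with
  | none => acc                                   -- IndexError; excluded by Pre_
  | some l =>
    match PySem.List.pyGet? l 2 with
    | none => acc
    | some x => acc ++ [x]

def get_best_models (n_models : Int) (result_models_validation : List (List Int)) (n_traces : Int) : List Int :=
  let result_number_of_traces_val :=
    (PySem.List.pyRange 0 n_models 1).foldl (pvStepA result_models_validation n_traces) []
  -- key=lambda l: l[:] is the list itself; Python list comparison = lexicographic order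
  let sorted_models := PySem.List.sorted result_number_of_traces_val (fun l => l)
  (PySem.List.pyRange 0 n_models 1).foldl (pvFinStepA sorted_models) []

-- ===== PORT B =====
-- 'while trimmed and trimmed[-1] == 1: trimmed.pop()' — popping from the end is dropping
-- the leading 1s of the reversed list
def pvTrimRev : List Int → List Int
  | [] => []
  | x :: t => if x = 1 then pvTrimRev t else x :: t

-- B's convergence_key(model_index); its two subscripts raise IndexError exactly where
-- A's do (outside Pre_), so the 'none' defaults are never read inside Pre_
def pvKeyB (result_models_validation : List (List Int)) (n_traces : Int) (model_index : Int) : List Int :=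
  match PySem.List.pyGet? result_models_validation model_index with
  | none => []                                    -- IndexError; excluded by Pre_
  | some row =>
    match PySem.List.pyGet? row (n_traces - 1) with
    | none => []                                  -- IndexError; excluded by Pre_
    | some fin =>
      if fin ≠ 1 then [fin, n_traces, model_index]
      else
        [fin,
         ((pvTrimRev (PySem.List.slice row none (some n_traces)).reverse).reverse.length : Int),
         model_index]

def get_best_models_alt (n_models : Int) (result_models_validation : List (List Int)) (n_traces : Int) : List Int :=
  PySem.List.sorted (PySem.List.pyRange 0 n_models 1) (pvKeyB result_models_validation n_traces)

-- ===== PRECONDITION & SPEC =====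
-- row is acceptable: row[n_traces-1] exists, and the row is not skipped by A (skipped =
-- final value 1 and every scanned entry 1), since a skipped row makes A's final loop
-- raise IndexError.
def pvRowOk (row : List Int) (n_traces : Int) : Prop :=
  (PySem.List.pyGet? row (n_traces - 1)).isSome ∧
  ¬ (PySem.List.pyGet? row (n_traces - 1) = some 1 ∧
     ∀ j ∈ PySem.List.pyRange (n_traces - 1) (-1) (-1), PySem.List.pyGetD row j 1 = 1)

-- Pre_ excludes exactly the inputs on which the Python A raises IndexError: a model index
-- beyond the list, a missing row entry at n_traces-1, or a skipped (fully converged) row.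
def Pre_get_best_models (n_models : Int) (result_models_validation : List (List Int)) (n_traces : Int) : Prop :=
  n_models ≤ (result_models_validation.length : Int) ∧
  ∀ row ∈ result_models_validation.take n_models.toNat, pvRowOk row n_traces

instance (n_models : Int) (result_models_validation : List (List Int)) (n_traces : Int) : Decidable (Pre_get_best_models n_models result_models_validation n_traces) := by
  unfold Pre_get_best_models pvRowOk; infer_instance

def pvWitness_get_best_models : Int × List (List Int) × Int := (1, [[0, 1]], 2)

def Spec_get_best_models (n_models : Int) (result_models_validation : List (List Int)) (n_traces : Int) (out : List Int) : Prop := out = get_best_models_alt n_models result_models_validation n_traces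
instance (n_models : Int) (result_models_validation : List (List Int)) (n_traces : Int) (out : List Int) : Decidable (Spec_get_best_models n_models result_models_validation n_traces out) := by unfold Spec_get_best_models; infer_instance

-- ===== CLAIM (what is proved, stated in full; the proofs are below) =====
def Claim_equal_get_best_models : Prop := ∀ (n_models : Int) (result_models_validation : List (List Int)) (n_traces : Int), Dom_get_best_models n_models result_models_validation n_traces → Pre_get_best_models n_models result_models_validation n_traces → Spec_get_best_models n_models result_models_validation n_traces (get_best_models n_models result_models_validation n_traces)

-- ===== LEMMAS AND PROOFS =====

-- the countdown range of A's inner loop is the reverse of the ascending range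
lemma pvRangeRev (n : Int) :
    PySem.List.pyRange (n - 1) (-1) (-1) = (PySem.List.pyRange 0 n 1).reverse := by
  have := PySem.List.pyRange_neg_one_eq_reverse (n - 1) (-1)
  simpa using this

-- membership in the take-prefix from a successful indexed access
lemma pvMemTake (rvs : List (List Int)) (n mi : Int) (row : List Int)
    (h0 : 0 ≤ mi) (hlt : mi < n) (hget : PySem.List.pyGet? rvs mi = some row) :
    row ∈ rvs.take n.toNat := by
  have hltlen : mi < (rvs.length : Int) := by
    by_contra hc
    rw [(PySem.List.pyGet?_eq_none_iff rvs mi).mpr (by unfold PySem.Raise.InRange; omega)] at hget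
    simp at hget
  have hrow : rvs[mi.toNat]'(by omega) = row := by
    rw [PySem.List.pyGet?_eq_some_getElem rvs h0 hltlen] at hget
    exact Option.some.inj hget
  have : (rvs.take n.toNat)[mi.toNat]'(by rw [List.length_take]; omega) = rvs[mi.toNat]'(by omega) := by
    simp
  rw [← hrow, ← this]
  exact List.getElem_mem _

-- A's backward find? vs B's trailing-trim: over the first n entries of row, the first
-- index of the countdown with a non-1 entry is (length of the trimmed prefix) - 1
lemma pvFindTrim (row : List Int) : ∀ (n : Nat), n ≤ row.length →
    (match ((PySem.List.pyRange 0 (n : Int) 1).reverse).find?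
        (fun i => PySem.List.pyGetD row i 1 != 1) with
     | some j => ((pvTrimRev (row.take n).reverse).length : Int) = j + 1
     | none => pvTrimRev (row.take n).reverse = []) := by
  intro n
  induction n with
  | zero => intro _; simp [PySem.List.pyRange_one_eq_nil, pvTrimRev]
  | succ m ih =>
    intro hle
    have hm : m < row.length := by omega
    have hrange : PySem.List.pyRange 0 ((m + 1 : Nat) : Int) 1
        = PySem.List.pyRange 0 (m : Int) 1 ++ [(m : Int)] := by
      have := PySem.List.pyRange_one_succ_right (a := 0) (b := (m : Int)) (by omega)
      push_cast
      simpa using this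
    have htake : row.take (m + 1) = row.take m ++ [row[m]] := by
      rw [List.take_add_one]
      simp [hm]
    have hget : PySem.List.pyGetD row ((m : Nat) : Int) 1 = row[m] := by
      rw [PySem.List.pyGetD_eq_getElem row 1 (by omega) (by omega)]
      simp
    rw [hrange, htake]
    simp only [List.reverse_append, List.reverse_cons, List.reverse_nil, List.nil_append,
      List.singleton_append, List.find?]
    by_cases h1 : row[m] = 1
    · have hpred : (PySem.List.pyGetD row ((m : Nat) : Int) 1 != 1) = false := by
        simp [hget, h1]
      rw [hpred]
      simp only [pvTrimRev, if_pos h1]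
      exact ih (by omega)
    · have hpred : (PySem.List.pyGetD row ((m : Nat) : Int) 1 != 1) = true := by
        simp [hget, h1]
      rw [hpred]
      simp only [pvTrimRev, if_neg h1, List.length_cons, List.length_reverse,
        List.length_take]
      have : min m row.length = m := by omega
      push_cast [this]
      ring

-- under Pre_, one pass of A's building loop appends exactly B's key of that model
lemma pvStepA_eq_key (rvs : List (List Int)) (nt mi : Int) (row : List Int)
    (hrow : PySem.List.pyGet? rvs mi = some row) (hok : pvRowOk row nt)
    (acc : List (List Int)) :
    pvStepA rvs nt acc mi = acc ++ [pvKeyB rvs nt mi] := by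
  obtain ⟨hsome, hnsk⟩ := hok
  obtain ⟨v, hv⟩ := Option.isSome_iff_exists.mp hsome
  unfold pvStepA pvKeyB
  rw [hrow]
  dsimp only
  rw [hv]
  dsimp only
  by_cases h1 : v = 1
  · subst h1
    -- row[n_traces-1] exists and equals 1, and the row is not skipped: some scanned
    -- entry is ≠ 1, so nt ≥ 1 and the countdown range is the reverse of [0, nt)
    have hex : ∃ j ∈ PySem.List.pyRange (nt - 1) (-1) (-1), PySem.List.pyGetD row j 1 ≠ 1 := by
      by_contra hc
      push Not at hc
      exact hnsk ⟨hv, hc⟩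
    obtain ⟨j0, hj0mem, hj0ne⟩ := hex
    have hj0 : 0 ≤ j0 ∧ j0 ≤ nt - 1 := by
      rw [pvRangeRev, List.mem_reverse, PySem.List.mem_pyRange_one] at hj0mem
      omega
    have hnt1 : 1 ≤ nt := by omega
    have hntlen : nt ≤ (row.length : Int) := by
      by_contra hc
      rw [(PySem.List.pyGet?_eq_none_iff row (nt - 1)).mpr
        (by unfold PySem.Raise.InRange; omega)] at hv
      simp at hv
    have hslice : PySem.List.slice row none (some nt) = row.take nt.toNat := by
      have h : nt = ((nt.toNat : Nat) : Int) := by omega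
      rw [h, PySem.List.slice_to_natCast]
      simp
      omega
    have hfind := pvFindTrim row nt.toNat (by omega)
    rw [pvRangeRev]
    have hcast : ((nt.toNat : Nat) : Int) = nt := by omega
    rw [hcast] at hfind
    cases hf : ((PySem.List.pyRange 0 nt 1).reverse.find?
        (fun i => PySem.List.pyGetD row i 1 != 1)) with
    | none =>
      exfalso
      rw [List.find?_eq_none] at hf
      rw [pvRangeRev] at hj0mem
      have h2 := hf j0 hj0mem
      simp at h2
      exact hj0ne h2
    | some j =>
      rw [hf] at hfind
      simp only [List.length_reverse]
      simp only at hfind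
      simp only [hslice, hfind]
      simp
  · simp [h1]

-- A's building loop produces exactly the map of B's key over the model range
lemma pvBuildMap (rvs : List (List Int)) (nt n : Int)
    (hok : ∀ mi ∈ PySem.List.pyRange 0 n 1,
      ∃ row, PySem.List.pyGet? rvs mi = some row ∧ pvRowOk row nt) :
    (PySem.List.pyRange 0 n 1).foldl (pvStepA rvs nt) []
      = (PySem.List.pyRange 0 n 1).map (pvKeyB rvs nt) := by
  have hcong : ∀ (acc : List (List Int)), ∀ mi ∈ PySem.List.pyRange 0 n 1,
      pvStepA rvs nt acc mi = acc ++ [pvKeyB rvs nt mi] := by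
    intro acc mi hmi
    obtain ⟨row, hrow, hrowok⟩ := hok mi hmi
    exact pvStepA_eq_key rvs nt mi row hrow hrowok acc
  rw [PySem.List.foldl_congr_mem _ _ _ [] hcong, PySem.List.foldl_append_singleton_eq_map]
  rfl

-- sorting the key images by identity = mapping the key over the key-sorted indices
lemma pvSortedMap (ms : List Int) (f : Int → List Int) :
    PySem.List.sorted (ms.map f) (fun l => l)
      = (PySem.List.sorted ms f).map f := by
  have h1 : PySem.List.sorted (ms.map f) (fun l => l) =
      @PySem.List.sorted _ _ List.instLinearOrder.toLT LinearOrder.toDecidableLT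
        (ms.map f) (fun l => l) false := by congr 1
  have h2 : PySem.List.sorted ms f =
      @PySem.List.sorted _ _ List.instLinearOrder.toLT LinearOrder.toDecidableLT
        ms f false := by congr 1
  rw [h1, h2]
  apply PySem.List.sorted_id_eq_of_perm_of_pairwise
  · exact (@PySem.List.sorted_perm _ _ List.instLinearOrder.toLT LinearOrder.toDecidableLT ms f false).map f
  · exact (@PySem.List.sorted_pairwise _ _ _ ms f).map f (fun a b h => h)

-- A's extraction loop over the key-shaped sorted list returns the indices themselves
lemma pvFinal (f : Int → List Int) (es : List Int) (n : Int) (h : n.toNat = es.length)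
    (hkey : ∀ m ∈ es, PySem.List.pyGet? (f m) 2 = some m) :
    (PySem.List.pyRange 0 n 1).foldl (pvFinStepA (es.map f)) [] = es := by
  by_cases hn : 0 ≤ n
  · have hcong : ∀ (acc : List Int), ∀ mi ∈ PySem.List.pyRange 0 n 1,
        pvFinStepA (es.map f) acc mi = acc ++ [PySem.List.pyGetD es mi 0] := by
      intro acc mi hmi
      rw [PySem.List.mem_pyRange_one] at hmi
      have hlt : mi < ((es.map f).length : Int) := by
        rw [List.length_map, ← h]; omega
      have hltn : mi.toNat < es.length := by rw [← h]; omega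
      unfold pvFinStepA
      rw [PySem.List.pyGet?_eq_some_getElem _ hmi.1 hlt]
      have hget : (es.map f)[mi.toNat]'(by simpa using hltn) = f es[mi.toNat] := by simp
      rw [hget]
      dsimp only
      rw [hkey es[mi.toNat] (List.getElem_mem _),
        PySem.List.pyGetD_eq_getElem es 0 hmi.1 (by omega)]
    rw [PySem.List.foldl_congr_mem _ _ _ [] hcong,
        PySem.List.foldl_append_singleton_eq_map]
    have hrange : PySem.List.pyRange 0 n 1 = PySem.List.pyRange 0 (PySem.List.len es) 1 := by
      have : n = (es.length : Int) := by omega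
      simp [this, PySem.List.len]
    rw [hrange]
    have := PySem.List.map_pyGetD_pyRange_zero es 0
    simpa using this
  · have : es = [] := by
      have : n.toNat = 0 := by omega
      rw [this] at h; exact (List.length_eq_zero_iff).mp h.symm
    subst this
    rw [PySem.List.pyRange_one_eq_nil (by omega)]
    rfl

-- ===== VERDICT (by name: the statement is the Claim_ definition above) =====
theorem get_best_models_spec : Claim_equal_get_best_models := by
  intro n_models rvs n_traces _ hpre
  obtain ⟨hlen, hrows⟩ := hpre
  unfold Spec_get_best_models get_best_models get_best_models_alt
  have hok : ∀ mi ∈ PySem.List.pyRange 0 n_models 1,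
      ∃ row, PySem.List.pyGet? rvs mi = some row ∧ pvRowOk row n_traces := by
    intro mi hmi
    rw [PySem.List.mem_pyRange_one] at hmi
    have hsome : (PySem.List.pyGet? rvs mi).isSome := by
      rw [Option.isSome_iff_ne_none]
      intro hc
      rw [PySem.List.pyGet?_eq_none_iff rvs mi] at hc
      unfold PySem.Raise.InRange at hc
      omega
    obtain ⟨row, hrow⟩ := Option.isSome_iff_exists.mp hsome
    exact ⟨row, hrow, hrows row (pvMemTake rvs n_models mi row hmi.1 hmi.2 hrow)⟩
  have hbuild := pvBuildMap rvs n_traces n_models hok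
  show (PySem.List.pyRange 0 n_models 1).foldl
      (pvFinStepA (PySem.List.sorted
        ((PySem.List.pyRange 0 n_models 1).foldl (pvStepA rvs n_traces) []) (fun l : List Int => l))) []
    = PySem.List.sorted (PySem.List.pyRange 0 n_models 1) (pvKeyB rvs n_traces)
  rw [hbuild, pvSortedMap]
  apply pvFinal
  · rw [PySem.List.length_sorted]
    simp [PySem.List.length_pyRange_one]
  · intro m hm
    have hmem : m ∈ PySem.List.pyRange 0 n_models 1 := by
      rw [PySem.List.mem_sorted] at hm; exact hm
    obtain ⟨row, hrow, hrowok⟩ := hok m hmem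
    obtain ⟨v, hv⟩ := Option.isSome_iff_exists.mp hrowok.1
    unfold pvKeyB
    rw [hrow]
    dsimp only
    rw [hv]
    dsimp only
    by_cases h1 : v = 1
    · simp [h1, PySem.List.pyGet?, PySem.List.pyIdx?]
    · simp [h1, PySem.List.pyGet?, PySem.List.pyIdx?]
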